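-- pv_equiv track=rewrite | github.com/Farony/-PyLearn | PythonBase/1_1_task.py | love_frec
-- ===== SOURCE A (Python) =====
-- def love_frec(petal_max_number):
--     def factorial(n):
--         f = 1
--         for x in range(1, n+1):
--             f *= x
--         return f
--
--     def sum_of_num(f):  # Находим сумму всех чисел факториала
--         s = str(f)
--         col = 0
--         for x in s:
--             col += int(x)
--         return col
--
--     def prime_number(number):
--         if number == 1:
--             return True
--         i = 2
--         while number % i != 0:
--             i += 1
--         return i == number
--
--     def chamomile(n):
--         if n < 1:
--             return -1
--         return prime_number(sum_of_num(factorial(n)))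
--
--     love = 0
--     for x in range(1, petal_max_number + 1):
--         if chamomile(x):
--             love += 1
--     return 'При максимальном количестве лепестков ' + str(petal_max_number) + ' любит встречается ' + str(love)
-- ===== SOURCE B (Python) =====
-- def love_frec(petal_max_number):
--     def digit_sum(f):
--         s = 0
--         for ch in str(f):
--             s += int(ch)
--         return s
--
--     def is_prime(number):
--         # digit sums of n! for n >= 1 are >= 1; 1 counts as prime here (1! -> 1)
--         if number == 1:
--             return True
--         i = 2
--         while i * i <= number:
--             if number % i == 0:
--                 return False
--             i += 1
--         return True
--
--     love = 0
--     f = 1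
--     for x in range(1, petal_max_number + 1):
--         f *= x  # factorial maintained incrementally instead of recomputed
--         if is_prime(digit_sum(f)):
--             love += 1
--     return 'При максимальном количестве лепестков ' + str(petal_max_number) + ' любит встречается ' + str(love)
-- ===== Notes on version B (the rewrite author's own statement) =====
-- stated objective: alternative
-- what changed: B maintains the factorial incrementally (f *= x) instead of recomputing it from scratch for every x, and replaces the linear smallest-divisor primality scan with trial division only up to sqrt(number).
import Mathlib
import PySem

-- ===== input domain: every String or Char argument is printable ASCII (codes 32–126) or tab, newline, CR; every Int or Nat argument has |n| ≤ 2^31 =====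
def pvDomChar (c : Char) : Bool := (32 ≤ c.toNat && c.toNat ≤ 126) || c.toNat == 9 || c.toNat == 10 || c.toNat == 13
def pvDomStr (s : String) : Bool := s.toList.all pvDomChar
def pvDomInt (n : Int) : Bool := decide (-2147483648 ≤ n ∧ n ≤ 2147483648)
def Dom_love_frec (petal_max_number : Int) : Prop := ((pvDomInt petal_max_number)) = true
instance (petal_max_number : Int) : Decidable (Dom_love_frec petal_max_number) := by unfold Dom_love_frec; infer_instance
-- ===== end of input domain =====

-- B maintains the factorial incrementally and tests primality by trial division up to sqrt,
-- instead of A's per-x factorial recomputation and linear smallest-divisor scan (objective: alternative).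

-- ===== PORT A =====

-- sum_of_num: identical digit-sum loop in both Pythons — shared transliteration
def pvDigitSum (f : Int) : Int :=
  ((PySem.Int.toStr f).toList).foldl
    (fun col x => col + (PySem.Int.ofStr? (String.ofList [x])).getD 0) 0

-- factorial(n): f = 1; for x in range(1, n+1): f *= x
def pvFactA (n : Int) : Int :=
  (PySem.List.pyRange 1 (n + 1) 1).foldl (fun f x => f * x) 1

-- the `while number % i != 0: i += 1` loop, returning the final i.  In A this loop only ever
-- runs with number ≥ 2 and 2 ≤ i ≤ number, where it stops at latest at i = number; the
-- `i < number` conjunct only totalises the states Python never reaches (there it diverges).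
def pvFindDiv (number i : Int) : Int :=
  if h : PySem.Int.mod number i ≠ 0 ∧ i < number then pvFindDiv number (i + 1) else i
termination_by (number - i).toNat
decreasing_by omega

def pvPrimeA (number : Int) : Bool :=
  if number = 1 then true else decide (pvFindDiv number 2 = number)

-- chamomile: for n < 1 Python returns -1, which is truthy at the only call site `if chamomile(x):`
def pvChamomileA (n : Int) : Bool :=
  if n < 1 then true else pvPrimeA (pvDigitSum (pvFactA n))

def love_frec (petal_max_number : Int) : String :=
  let love : Int :=
    (PySem.List.pyRange 1 (petal_max_number + 1) 1).foldl
      (fun love x => if pvChamomileA x then love + 1 else love) 0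
  "При максимальном количестве лепестков " ++ PySem.Int.toStr petal_max_number
    ++ " любит встречается " ++ PySem.Int.toStr love

-- ===== PORT B =====

-- B's trial-division loop: while i*i <= number: if number % i == 0: return False; i += 1.
-- B only calls it with i = 2; the `2 ≤ i` conjunct only totalises the unreachable states.
def pvTrialB (number i : Int) : Bool :=
  if h : 2 ≤ i ∧ i * i ≤ number then
    (if PySem.Int.mod number i = 0 then false else pvTrialB number (i + 1))
  else true
termination_by (number - i).toNat
decreasing_by
  have h2 : i * 2 ≤ i * i := by nlinarith [h.1]
  omega

def pvPrimeB (number : Int) : Bool :=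
  if number = 1 then true else pvTrialB number 2

-- love = 0; f = 1; for x in range(1, N+1): f *= x; if is_prime(digit_sum(f)): love += 1
def love_frec_alt (petal_max_number : Int) : String :=
  let r : Int × Int :=
    (PySem.List.pyRange 1 (petal_max_number + 1) 1).foldl
      (fun (st : Int × Int) x =>
        let f := st.1 * x
        (f, if pvPrimeB (pvDigitSum f) then st.2 + 1 else st.2)) (1, 0)
  "При максимальном количестве лепестков " ++ PySem.Int.toStr petal_max_number
    ++ " любит встречается " ++ PySem.Int.toStr r.2

-- ===== PRECONDITION & SPEC =====
def Spec_love_frec (petal_max_number : Int) (out : String) : Prop := out = love_frec_alt petal_max_number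
instance (petal_max_number : Int) (out : String) : Decidable (Spec_love_frec petal_max_number out) := by unfold Spec_love_frec; infer_instance

-- ===== CLAIM (what is proved, stated in full; the proofs are below) =====
def Claim_equal_love_frec : Prop := ∀ (petal_max_number : Int), Dom_love_frec petal_max_number → Spec_love_frec petal_max_number (love_frec petal_max_number)

-- ===== LEMMAS AND PROOFS =====

-- foldl with an additive body is init + sum of the mapped values
theorem pv_foldl_add (v : Char → Int) (l : List Char) (a : Int) :
    l.foldl (fun col x => col + v x) a = a + (l.map v).sum := by
  induction l generalizing a with
  | nil => simp
  | cons c t ih => simp [ih]; ring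

-- int(str-of-one-digit-char) = the digit's value
theorem pv_digitChar_val (d : Nat) (hd : d < 10) :
    (PySem.Int.ofChars? [Nat.digitChar d]).getD 0 = (d : Int) := by
  interval_cases d <;> decide

-- each digit value is nonnegative for digit chars produced by Nat.toDigits 10
theorem pv_digitsum_toDigits_ge (n : Nat) (hn : 1 ≤ n) :
    1 ≤ ((Nat.toDigits 10 n).map
          (fun x => (PySem.Int.ofStr? (String.ofList [x])).getD 0)).sum := by
  induction n using Nat.strong_induction_on with
  | _ n ih =>
    by_cases h : n < 10
    · rw [Nat.toDigits_of_lt_base h]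
      simp [pv_digitChar_val n h]
      omega
    · rw [Nat.toDigits_of_base_le (by norm_num) (by omega)]
      rw [List.map_append, List.sum_append]
      have h1 := ih (n / 10) (by omega) (by omega)
      have h2 : ((([( (n % 10)).digitChar]).map
          (fun x => (PySem.Int.ofStr? (String.ofList [x])).getD 0)).sum) = ((n % 10 : Nat) : Int) := by
        simp [PySem.Int.ofStr?, pv_digitChar_val (n % 10) (Nat.mod_lt _ (by norm_num))]
      rw [h2]
      omega

-- the digit sum of a positive integer is at least 1
theorem pv_digitSum_pos (f : Int) (hf : 1 ≤ f) : 1 ≤ pvDigitSum f := by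
  unfold pvDigitSum
  rw [PySem.Int.toList_toStr]
  unfold PySem.Int.toChars
  rw [if_neg (by omega)]
  rw [pv_foldl_add]
  have := pv_digitsum_toDigits_ge f.toNat (by omega)
  omega

-- pvFactA n ≥ 1 for n ≥ 0 (every range element is ≥ 1)
theorem pv_factA_pos (n : Nat) : 1 ≤ pvFactA (n : Int) := by
  induction n with
  | zero =>
    unfold pvFactA
    rw [PySem.List.pyRange_one_eq_nil (by omega)]
    simp
  | succ k ih =>
    unfold pvFactA at *
    push_cast
    have hsplit : PySem.List.pyRange 1 ((k : Int) + 1 + 1) 1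
        = PySem.List.pyRange 1 ((k : Int) + 1) 1 ++ [(k : Int) + 1] := by
      have := PySem.List.pyRange_one_succ_right (a := 1) (b := (k : Int) + 1) (by omega)
      simpa using this
    rw [hsplit, List.foldl_append]
    simp only [List.foldl]
    nlinarith

-- characterisation of A's smallest-divisor loop
theorem pv_findDiv_char (s : Int) :
    ∀ (k : Nat) (i : Int), 2 ≤ i → i ≤ s → (s - i).toNat = k →
      (pvFindDiv s i = s ↔ ∀ j : Int, i ≤ j → j < s → ¬ (j ∣ s)) := by
  intro k
  induction k with
  | zero =>
    intro i h2 hle hk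
    have hieq : i = s := by omega
    rw [pvFindDiv]
    rw [dif_neg (by rintro ⟨-, hq⟩; omega)]
    constructor
    · intro _ j hj1 hj2
      exact absurd hj2 (by omega)
    · intro _; exact hieq
  | succ k ih =>
    intro i h2 hle hk
    have hlt : i < s := by omega
    rw [pvFindDiv]
    by_cases hmod : PySem.Int.mod s i = 0
    · rw [dif_neg (by simp [hmod])]
      have hdvd : i ∣ s := (PySem.Int.mod_eq_zero_iff_dvd s i).mp hmod
      constructor
      · intro h; omega
      · intro h; exact absurd hdvd (h i le_rfl hlt)
    · rw [dif_pos ⟨hmod, hlt⟩]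
      rw [ih (i + 1) (by omega) (by omega) (by omega)]
      constructor
      · intro h j hj1 hj2
        rcases lt_or_ge i j with hij | hij
        · exact h j (by omega) hj2
        · have : j = i := by omega
          subst this
          intro hd
          exact hmod ((PySem.Int.mod_eq_zero_iff_dvd s j).mpr hd)
      · intro h j hj1 hj2
        exact h j (by omega) hj2

-- characterisation of B's trial-division loop
theorem pv_trialB_char (s : Int) :
    ∀ (k : Nat) (i : Int), 2 ≤ i → (s - i).toNat ≤ k →
      (pvTrialB s i = true ↔ ∀ j : Int, i ≤ j → j * j ≤ s → ¬ (j ∣ s)) := by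
  intro k
  induction k with
  | zero =>
    intro i h2 hk
    -- here s ≤ i, so i*i > s (as i ≥ 2) and the loop exits at once
    have his : s ≤ i := by omega
    rw [pvTrialB]
    have hii : ¬ (2 ≤ i ∧ i * i ≤ s) := by
      rintro ⟨_, hle⟩
      nlinarith
    rw [dif_neg hii]
    constructor
    · intro _ j hj1 hj2
      nlinarith
    · intro _; rfl
  | succ k ih =>
    intro i h2 hk
    rw [pvTrialB]
    by_cases hcond : 2 ≤ i ∧ i * i ≤ s
    · rw [dif_pos hcond]
      have hlt : i < s := by nlinarith [hcond.2]
      by_cases hmod : PySem.Int.mod s i = 0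
      · rw [if_pos hmod]
        have hdvd : i ∣ s := (PySem.Int.mod_eq_zero_iff_dvd s i).mp hmod
        constructor
        · intro h; cases h
        · intro h; exact absurd hdvd (h i le_rfl hcond.2)
      · rw [if_neg hmod]
        rw [ih (i + 1) (by omega) (by omega)]
        constructor
        · intro h j hj1 hj2
          rcases lt_or_ge i j with hij | hij
          · exact h j (by omega) hj2
          · have : j = i := by omega
            subst this
            intro hd
            exact hmod ((PySem.Int.mod_eq_zero_iff_dvd s j).mpr hd)
        · intro h j hj1 hj2
          exact h j (by omega) hj2
    · rw [dif_neg hcond]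
      have hii : ¬ (i * i ≤ s) := fun hle => hcond ⟨h2, hle⟩
      constructor
      · intro _ j hj1 hj2
        nlinarith
      · intro _; rfl

-- no divisor below s  ↔  no divisor below √s (for s ≥ 2)
theorem pv_sqrt_divisor (s : Int) (hs : 2 ≤ s) :
    (∀ j : Int, 2 ≤ j → j < s → ¬ (j ∣ s)) ↔ (∀ j : Int, 2 ≤ j → j * j ≤ s → ¬ (j ∣ s)) := by
  constructor
  · intro h j hj1 hj2
    exact h j hj1 (by nlinarith)
  · intro h j hj1 hj2 hdvd
    obtain ⟨c, hc⟩ := hdvd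
    have hc2 : 2 ≤ c := by
      by_contra hcl
      push Not at hcl
      have h1 : c ≤ 1 := by omega
      nlinarith
    by_cases hjj : j * j ≤ s
    · exact h j hj1 hjj ⟨c, hc⟩
    · have hcj : c < j := by nlinarith
      exact h c hc2 (by nlinarith) ⟨j, by linarith [hc, mul_comm j c]⟩

-- the two primality tests agree on every s ≥ 1
theorem pv_prime_agree (s : Int) (hs : 1 ≤ s) : pvPrimeA s = pvPrimeB s := by
  by_cases h1 : s = 1
  · simp [pvPrimeA, pvPrimeB, h1]
  · have hs2 : 2 ≤ s := by omega
    unfold pvPrimeA pvPrimeB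
    rw [if_neg h1, if_neg h1]
    have hA := pv_findDiv_char s (s - 2).toNat 2 (by omega) hs2 rfl
    have hB := pv_trialB_char s (s - 2).toNat 2 (by omega) (by omega)
    rcases hb : pvTrialB s 2 with _ | _
    · -- trial returned false: some divisor with j*j ≤ s exists, so findDiv ≠ s
      simp only [decide_eq_false_iff_not]
      intro hfind
      have hno := (hA.mp hfind)
      have := ((pv_sqrt_divisor s hs2).mp hno)
      have : pvTrialB s 2 = true := hB.mpr this
      rw [hb] at this
      cases this
    · simp only [decide_eq_true_eq]
      exact hA.mpr ((pv_sqrt_divisor s hs2).mpr (hB.mp hb))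

-- main loop invariant: B's pair-fold carries (factorial x, A's count)
theorem pv_fold_inv (n : Nat) :
    (PySem.List.pyRange 1 ((n : Int) + 1) 1).foldl
      (fun (st : Int × Int) x =>
        let f := st.1 * x
        (f, if pvPrimeB (pvDigitSum f) then st.2 + 1 else st.2)) (1, 0)
    = (pvFactA (n : Int),
       (PySem.List.pyRange 1 ((n : Int) + 1) 1).foldl
         (fun love x => if pvChamomileA x then love + 1 else love) 0) := by
  induction n with
  | zero =>
    rw [PySem.List.pyRange_one_eq_nil (by omega)]
    unfold pvFactA
    rw [PySem.List.pyRange_one_eq_nil (by omega)]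
    simp
  | succ k ih =>
    have hsplit : PySem.List.pyRange 1 ((k : Int) + 1 + 1) 1
        = PySem.List.pyRange 1 ((k : Int) + 1) 1 ++ [(k : Int) + 1] := by
      have := PySem.List.pyRange_one_succ_right (a := 1) (b := (k : Int) + 1) (by omega)
      simpa using this
    have hfact : pvFactA ((k : Int) + 1) = pvFactA (k : Int) * ((k : Int) + 1) := by
      unfold pvFactA
      rw [hsplit, List.foldl_append]
      simp
    push_cast
    rw [hsplit, List.foldl_append, List.foldl_append, ih]
    simp only [List.foldl]
    rw [← hfact]
    have hcham : pvChamomileA ((k : Int) + 1)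
        = pvPrimeB (pvDigitSum (pvFactA ((k : Int) + 1))) := by
      unfold pvChamomileA
      rw [if_neg (by omega)]
      exact pv_prime_agree _ (pv_digitSum_pos _ (by
        have := pv_factA_pos (k + 1)
        push_cast at this ⊢
        omega))
    rw [hcham]

-- ===== VERDICT (by name: the statement is the Claim_ definition above) =====
theorem love_frec_spec : Claim_equal_love_frec := by
  intro p _
  unfold Spec_love_frec love_frec love_frec_alt
  rcases le_or_gt 0 p with hp | hp
  · lift p to ℕ using hp with n
    rw [pv_fold_inv n]
  · rw [PySem.List.pyRange_one_eq_nil (by omega)]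
    simp
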